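-- pv_equiv track=rewrite | github.com/Khuf2/CTP | User.py | queryRead
-- ===== SOURCE A (Python) =====
-- def queryRead(args):
--     # line = "age=80, phys>=80"
--     # This needs to be updated. I used to send in line. Now I send in the args list of conditions, which need to be translated and appended to fullList.
--     category = ""
--     condEx = ""
--     fullList = []
--     list = []
--     for condition in args:
--         for letter in condition:
--             if(letter == ' ' or letter == ","):
--                 continue
--
--             if(not letter.isalnum()):
--                 if(category != ""):
--                     list.append(category)
--                     category = ""
--                 condEx += letter
--             else:
--                 if(condEx != ""):
--                     list.append(condEx)
--                     condEx = ""
--                 category += str(letter)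
--         if(category != ""):
--             list.append(category)
--         fullList.append(list.copy())
--         list = []
--         category = ""
--         condEx = ""
--     return fullList
-- ===== SOURCE B (Python) =====
-- def _tokens(cleaned):
--     # split the cleaned character list into maximal runs of equal isalnum-kind
--     toks = []
--     i, n = 0, len(cleaned)
--     while i < n:
--         k = cleaned[i].isalnum()
--         j = i + 1
--         while j < n and cleaned[j].isalnum() == k:
--             j += 1
--         toks.append(''.join(cleaned[i:j]))
--         i = j
--     return toks
--
-- def queryRead(args):
--     out = []
--     for cond in args:
--         cleaned = [c for c in cond if c != ' ' and c != ',']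
--         toks = _tokens(cleaned)
--         if cleaned and not cleaned[-1].isalnum():
--             toks.pop()  # a trailing operator run is dropped, as in the original
--         out.append(toks)
--     return out
-- ===== Notes on version B (the rewrite author's own statement) =====
-- stated objective: alternative
-- what changed: A interleaves space/comma-skipping with two string accumulators flushed on kind changes inside one character loop; B instead filters out spaces/commas first, splits the cleaned sequence into maximal runs of equal isalnum-kind with a two-pointer scan, and finally pops a trailing operator run.
import Mathlib
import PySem

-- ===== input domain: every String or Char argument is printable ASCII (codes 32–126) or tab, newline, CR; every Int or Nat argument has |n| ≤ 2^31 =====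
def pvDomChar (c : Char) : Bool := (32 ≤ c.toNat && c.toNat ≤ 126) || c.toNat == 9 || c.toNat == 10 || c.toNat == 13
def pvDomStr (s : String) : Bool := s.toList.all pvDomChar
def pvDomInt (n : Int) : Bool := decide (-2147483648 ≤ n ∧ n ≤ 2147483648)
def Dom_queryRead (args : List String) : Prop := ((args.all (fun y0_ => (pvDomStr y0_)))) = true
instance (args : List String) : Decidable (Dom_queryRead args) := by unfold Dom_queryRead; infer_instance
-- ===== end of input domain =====

-- B: instead of A's interleaved accumulators, filter out spaces/commas first, split the
-- cleaned characters into maximal runs of equal isalnum-kind, then drop a trailing operator run.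

-- ===== PORT A =====
-- strings accumulated by A are represented by their character lists (category, condEx)
def qrStep (st : List Char × List Char × List String) (letter : Char) :
    List Char × List Char × List String :=
  match st with
  | (category, condEx, lst) =>
    if letter = ' ' ∨ letter = ',' then (category, condEx, lst)
    else if ¬ PySem.Chars.isalnum letter then
      if category ≠ [] then ([], condEx ++ [letter], lst ++ [String.mk category])
      else (category, condEx ++ [letter], lst)
    else
      if condEx ≠ [] then (category ++ [letter], [], lst ++ [String.mk condEx])
      else (category ++ [letter], condEx, lst)

def queryRead (args : List String) : List (List String) :=
  (args.foldl (fun acc condition =>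
      match acc with
      | (category, condEx, fullList) =>
        match condition.toList.foldl qrStep (category, condEx, []) with
        | (category, _, lst) =>
          (([] : List Char), ([] : List Char),
            fullList ++ [if category ≠ [] then lst ++ [String.mk category] else lst]))
    ([], [], [])).2.2

-- ===== PORT B =====
def tokensB (cs : List Char) : List String :=
  match cs with
  | [] => []
  | c :: rest =>
    String.mk (c :: rest.takeWhile (fun d => PySem.Chars.isalnum d == PySem.Chars.isalnum c)) ::
      tokensB (rest.dropWhile (fun d => PySem.Chars.isalnum d == PySem.Chars.isalnum c))
termination_by cs.length
decreasing_by
  simp only [List.length_cons]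
  exact Nat.lt_succ_of_le (List.length_dropWhile_le _ _)

def queryRead_alt (args : List String) : List (List String) :=
  args.map fun cond =>
    let cleaned := cond.toList.filter (fun c => c != ' ' && c != ',')
    let toks := tokensB cleaned
    match cleaned.getLast? with
    | some c => if ¬ PySem.Chars.isalnum c then toks.dropLast else toks
    | none => toks

-- ===== PRECONDITION & SPEC =====
def Spec_queryRead (args : List String) (out : List (List String)) : Prop := out = queryRead_alt args
instance (args : List String) (out : List (List String)) : Decidable (Spec_queryRead args out) := by unfold Spec_queryRead; infer_instance

-- ===== CLAIM (what is proved, stated in full; the proofs are below) =====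
def Claim_equal_queryRead : Prop := ∀ (args : List String), Dom_queryRead args → Spec_queryRead args (queryRead args)

-- ===== LEMMAS AND PROOFS =====

-- incremental tokenizer modelling A's accumulator discipline: pend is the current run, k its kind
def tokA (pend : List Char) (k : Bool) : List Char → List String
  | [] => if k then [String.mk pend] else []
  | c :: cs =>
    if PySem.Chars.isalnum c = k then tokA (pend ++ [c]) k cs
    else (if pend ≠ [] then [String.mk pend] else []) ++ tokA [c] (PySem.Chars.isalnum c) cs

-- A's inner fold ignores spaces/commas
theorem foldl_qrStep_filter (cs : List Char) (st : List Char × List Char × List String) :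
    cs.foldl qrStep st = (cs.filter (fun c => c != ' ' && c != ',')).foldl qrStep st := by
  induction cs generalizing st with
  | nil => rfl
  | cons c cs ih =>
    by_cases h : c = ' ' ∨ c = ','
    · have hf : (fun c => c != ' ' && c != ',') c = false := by
        rcases h with h | h <;> simp [h]
      have hs : qrStep st c = st := by
        obtain ⟨a, b, l⟩ := st
        simp [qrStep, h]
      simp [List.filter_cons, hf, List.foldl_cons, hs, ih]
    · have hf : (fun c => c != ' ' && c != ',') c = true := by
        push_neg at h; simp [h.1, h.2]
      simp [List.filter_cons, hf, List.foldl_cons, ih]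

def finishA (cs : List Char) (cat op : List Char) (lst : List String) : List String :=
  match cs.foldl qrStep (cat, op, lst) with
  | (category, _, l) => if category ≠ [] then l ++ [String.mk category] else l

-- main invariant: A's fold+flush computes tokA
theorem finishA_eq_tokA (cs : List Char) (pend : List Char) (k : Bool) (lst : List String)
    (hne : k = true → pend ≠ [])
    (hcs : ∀ c ∈ cs, ¬(c = ' ' ∨ c = ',')) :
    finishA cs (cond k pend []) (cond k [] pend) lst = lst ++ tokA pend k cs := by
  induction cs generalizing pend k lst with
  | nil =>
    cases k with
    | false => simp [finishA, tokA]
    | true => simp [finishA, tokA, hne rfl]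
  | cons c cs ih =>
    have hc := hcs c (List.mem_cons_self ..)
    have hcs' : ∀ c ∈ cs, ¬(c = ' ' ∨ c = ',') := fun d hd => hcs d (List.mem_cons_of_mem _ hd)
    by_cases ha : PySem.Chars.isalnum c = k
    · cases k with
      | true =>
        have h1 : finishA (c :: cs) (cond true pend []) (cond true [] pend) lst
            = finishA cs (cond true (pend ++ [c]) []) (cond true [] (pend ++ [c])) lst := by
          simp [finishA, qrStep, hc, ha, hne rfl]
        have h2 := ih (pend ++ [c]) true lst (by simp) hcs'
        rw [h1, h2, tokA, if_pos ha]
      | false =>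
        have h1 : finishA (c :: cs) (cond false pend []) (cond false [] pend) lst
            = finishA cs (cond false (pend ++ [c]) []) (cond false [] (pend ++ [c])) lst := by
          simp [finishA, qrStep, hc, ha]
        have h2 := ih (pend ++ [c]) false lst (by simp) hcs'
        rw [h1, h2, tokA, if_pos ha]
    · cases k with
      | true =>
        have hca : PySem.Chars.isalnum c = false := by
          cases h : PySem.Chars.isalnum c <;> simp_all
        have h1 : finishA (c :: cs) (cond true pend []) (cond true [] pend) lst
            = finishA cs (cond false [c] []) (cond false [] [c]) (lst ++ [String.mk pend]) := by
          simp [finishA, qrStep, hc, hca, hne rfl]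
        have h2 := ih [c] false (lst ++ [String.mk pend]) (by simp) hcs'
        rw [h1, h2, tokA, if_neg ha, if_pos (hne rfl), hca]
        simp
      | false =>
        have hca : PySem.Chars.isalnum c = true := by
          cases h : PySem.Chars.isalnum c <;> simp_all
        by_cases hp : pend = []
        · have h1 : finishA (c :: cs) (cond false pend []) (cond false [] pend) lst
              = finishA cs (cond true [c] []) (cond true [] [c]) lst := by
            simp [finishA, qrStep, hc, hca, hp]
          have h2 := ih [c] true lst (by simp) hcs'
          rw [h1, h2, tokA, if_neg ha, if_neg (by simp [hp]), hca]
          simp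
        · have h1 : finishA (c :: cs) (cond false pend []) (cond false [] pend) lst
              = finishA cs (cond true [c] []) (cond true [] [c]) (lst ++ [String.mk pend]) := by
            simp [finishA, qrStep, hc, hca, hp]
          have h2 := ih [c] true (lst ++ [String.mk pend]) (by simp) hcs'
          rw [h1, h2, tokA, if_neg ha, if_pos hp, hca]
          simp

-- tokA absorbs a whole run of its own kind
theorem tokA_absorb (r : List Char) (rest : List Char) (pend : List Char) (k : Bool)
    (hr : ∀ c ∈ r, PySem.Chars.isalnum c = k) :
    tokA pend k (r ++ rest) = tokA (pend ++ r) k rest := by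
  induction r generalizing pend with
  | nil => simp
  | cons c r ih =>
    have hck := hr c (List.mem_cons_self ..)
    have := ih (pend ++ [c]) (fun d hd => hr d (List.mem_cons_of_mem _ hd))
    rw [List.cons_append, tokA, if_pos hck, this]
    simp

-- B's per-condition result on a cleaned character list
def tokB (cs : List Char) : List String :=
  match cs.getLast? with
  | some c => if ¬ PySem.Chars.isalnum c then (tokensB cs).dropLast else tokensB cs
  | none => tokensB cs

theorem tokensB_ne_nil (c : Char) (cs : List Char) : tokensB (c :: cs) ≠ [] := by
  rw [tokensB]; simp

theorem tokA_nil_false (c : Char) (cs : List Char) :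
    tokA [] false (c :: cs) = tokA [c] (PySem.Chars.isalnum c) cs := by
  cases h : PySem.Chars.isalnum c with
  | false => rw [tokA, if_pos h]; simp
  | true => rw [tokA, if_neg (by simp [h]), if_neg (by simp), h]; simp

theorem dropWhile_head_false {p : Char → Bool} {d : Char} {l t : List Char}
    (h : l.dropWhile p = d :: t) : p d = false := by
  induction l with
  | nil => simp at h
  | cons x xs ih =>
    rw [List.dropWhile_cons] at h
    split at h
    · exact ih h
    · cases h; simp_all

theorem tokA_eq_tokB (cs : List Char) : tokA [] false cs = tokB cs := by
  induction hn : cs.length using Nat.strong_induction_on generalizing cs with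
  | _ n ih =>
  cases cs with
  | nil => simp [tokA, tokB, tokensB]
  | cons c rest =>
    set k := PySem.Chars.isalnum c with hk
    set r := rest.takeWhile (fun d => PySem.Chars.isalnum d == k) with hr
    set rest' := rest.dropWhile (fun d => PySem.Chars.isalnum d == k) with hrest'
    have hsplit : rest = r ++ rest' := (List.takeWhile_append_dropWhile ..).symm
    have hrk : ∀ d ∈ r, PySem.Chars.isalnum d = k := by
      intro d hd
      rw [hr] at hd
      simpa using List.mem_takeWhile_imp hd
    have habs : tokA [] false (c :: rest) = tokA (c :: r) k rest' := by
      rw [tokA_nil_false, ← hk, hsplit]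
      have := tokA_absorb r rest' [c] k hrk
      simpa using this
    have htb : tokensB (c :: rest) = String.mk (c :: r) :: tokensB rest' := by
      rw [tokensB]
    cases hre : rest' with
    | nil =>
      -- single run: every char of c :: rest has kind k
      have hall : ∀ d ∈ c :: rest, PySem.Chars.isalnum d = k := by
        intro d hd
        rcases List.mem_cons.mp hd with h | h
        · rw [h, hk]
        · refine hrk d ?_
          rw [hsplit, hre] at h
          simpa using h
      obtain ⟨e, he⟩ : ∃ e, (c :: rest).getLast? = some e :=
        ⟨_, List.getLast?_eq_some_getLast (by simp)⟩
      have hek : PySem.Chars.isalnum e = k := hall e (List.mem_of_getLast? he)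
      have h0 : tokensB ([] : List Char) = [] := by rw [tokensB]
      have htb0 : tokensB (c :: rest) = [String.mk (c :: r)] := by rw [htb, hre, h0]
      rw [habs, hre, tokA, tokB, he, htb0]
      by_cases hkk : k = true
      · simp [hkk, hek]
      · simp [hkk, hek]
    | cons d rest'' =>
      have hd : PySem.Chars.isalnum d ≠ k := by
        have := dropWhile_head_false (hrest'.symm.trans hre)
        simpa using this
      have h1 : tokA (c :: r) k rest' = String.mk (c :: r) :: tokA [] false rest' := by
        rw [hre, tokA]
        rw [if_neg hd]
        rw [if_pos (show (c :: r) ≠ [] by simp)]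
        rw [tokA_nil_false]
        simp
      have hlen : rest'.length < n := by
        rw [← hn, hsplit]
        simp only [List.length_cons, List.length_append]
        omega
      have hih : tokA [] false rest' = tokB rest' := ih rest'.length hlen rest' rfl
      have hne2 : rest' ≠ [] := by rw [hre]; simp
      have hlast : (c :: rest).getLast? = rest'.getLast? := by
        rw [hsplit, show c :: (r ++ rest') = (c :: r) ++ rest' by simp]
        exact List.getLast?_append_of_ne_nil _ hne2
      rw [habs, h1, hih, tokB, tokB, hlast, htb, hre]
      cases hgl : (d :: rest'').getLast? with
      | none => simp at hgl
      | some e =>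
        by_cases he : PySem.Chars.isalnum e
        · simp [he]
        · have hne : tokensB (d :: rest'') ≠ [] := tokensB_ne_nil d rest''
          simp [he, List.dropLast_cons_of_ne_nil hne]

-- per condition, A = B
theorem percond_eq (cond : String) :
    finishA cond.toList [] [] [] =
      (let cleaned := cond.toList.filter (fun c => c != ' ' && c != ',')
       let toks := tokensB cleaned
       match cleaned.getLast? with
       | some c => if ¬ PySem.Chars.isalnum c then toks.dropLast else toks
       | none => toks) := by
  have h1 : finishA cond.toList [] [] [] =
      finishA (cond.toList.filter (fun c => c != ' ' && c != ',')) [] [] [] := by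
    unfold finishA
    rw [foldl_qrStep_filter]
  have h2 := finishA_eq_tokA (cond.toList.filter (fun c => c != ' ' && c != ',')) [] false []
    (by simp)
    (by intro c hc
        have := List.of_mem_filter hc
        simp only [Bool.and_eq_true, bne_iff_ne] at this
        tauto)
  simp only [Bool.cond_false] at h2
  rw [h1, h2, List.nil_append, tokA_eq_tokB]
  rfl

-- the outer fold is a map
theorem outer_fold (args : List String) (fl : List (List String)) :
    (args.foldl (fun acc condition =>
      match acc with
      | (category, condEx, fullList) =>
        match condition.toList.foldl qrStep (category, condEx, []) with
        | (category, _, lst) =>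
          (([] : List Char), ([] : List Char),
            fullList ++ [if category ≠ [] then lst ++ [String.mk category] else lst]))
      ([], [], fl)).2.2 = fl ++ args.map (fun cond => finishA cond.toList [] [] []) := by
  induction args generalizing fl with
  | nil => simp
  | cons a args ih =>
    rw [List.foldl_cons, List.map_cons]
    have hstep : (match (([] : List Char), ([] : List Char), fl) with
        | (category, condEx, fullList) =>
          match a.toList.foldl qrStep (category, condEx, []) with
          | (category, _, lst) =>
            (([] : List Char), ([] : List Char),
              fullList ++ [if category ≠ [] then lst ++ [String.mk category] else lst]))
        = (([] : List Char), ([] : List Char), fl ++ [finishA a.toList [] [] []]) := by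
      unfold finishA
      rcases hfold : a.toList.foldl qrStep (([] : List Char), ([] : List Char), ([] : List String)) with ⟨x, y, z⟩
      simp only [hfold]
    rw [hstep, ih]
    simp

-- ===== VERDICT (by name: the statement is the Claim_ definition above) =====
theorem queryRead_spec : Claim_equal_queryRead := by
  intro args _
  unfold Spec_queryRead queryRead queryRead_alt
  rw [outer_fold]
  simp only [List.nil_append]
  exact List.map_congr_left fun cond _ => percond_eq cond
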